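-- pv_equiv track=rewrite | github.com/Abdelmoneim000/alx-higher_level_programming | 0x03-python-data_structures/7-add_tuple.py | add_tuple
-- ===== SOURCE A (Python) =====
-- def add_tuple(tuple_a=(), tuple_b=()):
--     if len(tuple_a) > len(tuple_b):
--         new_t = list(tuple_a)
--     else:
--         new_t = list(tuple_b)
--     if len(tuple_a) > len(tuple_b):
--         for i in range(len(new_t)):
--             if len(tuple_b) - 1 < i:
--                 new_t[i] = new_t[i] + 0
--             else:
--                 new_t[i] = new_t[i] + tuple_b[i]
--     else:
--         for i in range(len(new_t)):
--             if len(tuple_a) - 1 < i: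
--                 new_t[i] = new_t[i] + 0
--             else:
--                 new_t[i] = new_t[i] + tuple_a[i]
--     return tuple(new_t)
-- ===== SOURCE B (Python) =====
-- def add_tuple(tuple_a=(), tuple_b=()):
--     summed = tuple(x + y for x, y in zip(tuple_a, tuple_b))
--     n = len(summed)
--     return summed + tuple_a[n:] + tuple_b[n:]
-- ===== Notes on version B (the rewrite author's own statement) =====
-- stated objective: simpler
-- what changed: B replaces A's copy-the-longer-tuple-then-fix-up-by-index loop (length branch duplicated twice, per-index bounds check) by summing the zipped common prefix and appending both leftover tails, with no index arithmetic.
import Mathlib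
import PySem

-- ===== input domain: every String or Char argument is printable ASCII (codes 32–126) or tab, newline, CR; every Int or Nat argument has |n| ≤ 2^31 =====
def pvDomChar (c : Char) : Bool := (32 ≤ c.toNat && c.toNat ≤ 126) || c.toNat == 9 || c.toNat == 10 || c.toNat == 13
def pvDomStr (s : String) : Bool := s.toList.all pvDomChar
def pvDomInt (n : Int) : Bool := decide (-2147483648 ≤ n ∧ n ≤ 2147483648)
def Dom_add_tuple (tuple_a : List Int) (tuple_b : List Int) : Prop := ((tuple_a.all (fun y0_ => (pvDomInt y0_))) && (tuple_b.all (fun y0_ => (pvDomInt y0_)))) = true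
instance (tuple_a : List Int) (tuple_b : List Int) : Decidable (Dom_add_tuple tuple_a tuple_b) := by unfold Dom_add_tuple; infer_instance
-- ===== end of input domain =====

-- B rewrites A's copy-the-longer-then-fix-up-by-index loop as: zip the common prefix,
-- sum it, append both leftover tails (simpler decomposition, same O(n) cost).


-- ===== PORT A =====
-- Literal port of A: copy the longer tuple, then loop over all indices adding the
-- other tuple's entry (or 0 past its end).  new_t[i] (index always in range) is read
-- with getD and written back with List.set.
def add_tuple (tuple_a : List Int) (tuple_b : List Int) : List Int :=
  let new_t := if tuple_a.length > tuple_b.length then tuple_a else tuple_b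
  if tuple_a.length > tuple_b.length then
    (List.range new_t.length).foldl (fun (t : List Int) (i : Nat) =>
      if (tuple_b.length : Int) - 1 < (i : Int) then t.set i (t.getD i 0 + 0)
      else t.set i (t.getD i 0 + tuple_b.getD i 0)) new_t
  else
    (List.range new_t.length).foldl (fun (t : List Int) (i : Nat) =>
      if (tuple_a.length : Int) - 1 < (i : Int) then t.set i (t.getD i 0 + 0)
      else t.set i (t.getD i 0 + tuple_a.getD i 0)) new_t

-- ===== PORT B =====
-- Port of B (Source B): sum the zipped common prefix, then append both leftover tails
-- (tuple[n:] with n = len(summed) ≥ 0 is exactly List.drop n).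
def add_tuple_alt (tuple_a : List Int) (tuple_b : List Int) : List Int :=
  let summed := (tuple_a.zip tuple_b).map (fun p => p.1 + p.2)
  let n := summed.length
  summed ++ tuple_a.drop n ++ tuple_b.drop n

-- ===== PRECONDITION & SPEC =====
def Spec_add_tuple (tuple_a : List Int) (tuple_b : List Int) (out : List Int) : Prop := out = add_tuple_alt tuple_a tuple_b
instance (tuple_a : List Int) (tuple_b : List Int) (out : List Int) : Decidable (Spec_add_tuple tuple_a tuple_b out) := by unfold Spec_add_tuple; infer_instance

-- ===== CLAIM (what is proved, stated in full; the proofs are below) =====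
def Claim_equal_add_tuple : Prop := ∀ (tuple_a : List Int) (tuple_b : List Int), Dom_add_tuple tuple_a tuple_b → Spec_add_tuple tuple_a tuple_b (add_tuple tuple_a tuple_b)

-- ===== LEMMAS AND PROOFS =====

-- Rewriting equations for B on cons/nil shapes.
theorem alt_nil_left (b : List Int) : add_tuple_alt [] b = b := by
  simp [add_tuple_alt]

theorem alt_nil_right (a : List Int) : add_tuple_alt a [] = a := by
  simp [add_tuple_alt]

theorem alt_cons (x y : Int) (xs ys : List Int) :
    add_tuple_alt (x :: xs) (y :: ys) = (x + y) :: add_tuple_alt xs ys := by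
  simp [add_tuple_alt]

-- B's result: length is the max of the two lengths, and every entry (with default 0)
-- is the sum of the corresponding entries (with default 0).
theorem alt_length : ∀ (a b : List Int), (add_tuple_alt a b).length = max a.length b.length
  | [], b => by simp [alt_nil_left]
  | x :: xs, [] => by simp [alt_nil_right]
  | x :: xs, y :: ys => by
      simp [alt_cons, alt_length xs ys, Nat.succ_max_succ]

theorem alt_getD : ∀ (a b : List Int) (i : Nat),
    (add_tuple_alt a b).getD i 0 = a.getD i 0 + b.getD i 0
  | [], b, i => by simp [alt_nil_left]
  | x :: xs, [], i => by simp [alt_nil_right]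
  | x :: xs, y :: ys, i => by
      cases i with
      | zero => simp [alt_cons]
      | succ n => simpa [alt_cons] using alt_getD xs ys n

-- A's loop: folding `set i (g i t[i])` over all indices is mapIdx.
theorem fold_set_append (g : Nat → Int → Int) (L : List Nat) :
    ∀ (t : List Int) (x : Int), (∀ i ∈ L, i < t.length) →
    L.foldl (fun s i => s.set i (g i (s.getD i 0))) (t ++ [x])
      = L.foldl (fun s i => s.set i (g i (s.getD i 0))) t ++ [x] := by
  induction L with
  | nil => intro t x _; rfl
  | cons j L ih =>
      intro t x h
      have hj : j < t.length := h j (by simp)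
      simp only [List.foldl_cons, List.getD_append t [x] 0 j hj,
        List.set_append_left j _ hj]
      exact ih _ x (by intro i hi; simpa using h i (by simp [hi]))

theorem fold_set_range (g : Nat → Int → Int) (t : List Int) :
    (List.range t.length).foldl (fun s i => s.set i (g i (s.getD i 0))) t
      = t.mapIdx g := by
  induction t using List.reverseRecOn with
  | nil => rfl
  | append_singleton t x ih =>
      have hlen : (t ++ [x]).length = t.length + 1 := by simp
      rw [hlen, List.range_succ, List.foldl_append,
        fold_set_append g (List.range t.length) t x (by intro i hi; simpa using hi), ih]
      have hl : (t.mapIdx g).length = t.length := by simp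
      simp only [List.foldl_cons, List.foldl_nil]
      simp [List.set_append_right, hl, List.mapIdx_append, List.getD]

-- A's result, rephrased through fold_set_range: one mapIdx over the longer tuple.
theorem add_tuple_eq_mapIdx (a b : List Int) :
    add_tuple a b =
      if a.length > b.length then
        a.mapIdx (fun i x => if (b.length : Int) - 1 < (i : Int) then x + 0 else x + b.getD i 0)
      else
        b.mapIdx (fun i x => if (a.length : Int) - 1 < (i : Int) then x + 0 else x + a.getD i 0) := by
  unfold add_tuple
  by_cases h : a.length > b.length
  · simp only [if_pos h]
    have hfun : (fun (t : List Int) (i : Nat) =>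
        if (b.length : Int) - 1 < (i : Int) then t.set i (t.getD i 0 + 0)
        else t.set i (t.getD i 0 + b.getD i 0))
      = fun (t : List Int) (i : Nat) =>
        t.set i ((fun (i : Nat) (x : Int) =>
          if (b.length : Int) - 1 < (i : Int) then x + 0 else x + b.getD i 0) i (t.getD i 0)) := by
      funext t i; by_cases hc : (b.length : Int) - 1 < (i : Int) <;> simp [hc]
    rw [hfun]
    exact fold_set_range (fun (i : Nat) (x : Int) => if (b.length : Int) - 1 < (i : Int) then x + 0 else x + b.getD i 0) a
  · simp only [if_neg h]
    have hfun : (fun (t : List Int) (i : Nat) =>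
        if (a.length : Int) - 1 < (i : Int) then t.set i (t.getD i 0 + 0)
        else t.set i (t.getD i 0 + a.getD i 0))
      = fun (t : List Int) (i : Nat) =>
        t.set i ((fun (i : Nat) (x : Int) =>
          if (a.length : Int) - 1 < (i : Int) then x + 0 else x + a.getD i 0) i (t.getD i 0)) := by
      funext t i; by_cases hc : (a.length : Int) - 1 < (i : Int) <;> simp [hc]
    rw [hfun]
    exact fold_set_range (fun (i : Nat) (x : Int) => if (a.length : Int) - 1 < (i : Int) then x + 0 else x + a.getD i 0) b

theorem index_cond (m : Nat) (i : Nat) :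
    ((m : Int) - 1 < (i : Int)) ↔ m ≤ i := by omega


-- ===== VERDICT (by name: the statement is the Claim_ definition above) =====
theorem add_tuple_spec : Claim_equal_add_tuple := by
  intro a b _
  unfold Spec_add_tuple
  rw [add_tuple_eq_mapIdx]
  by_cases h : a.length > b.length
  · rw [if_pos h]
    apply List.ext_getElem
    · simp [alt_length]; omega
    · intro i h1 h2
      rw [List.getElem_mapIdx, ← List.getD_eq_getElem (add_tuple_alt a b) 0 h2, alt_getD]
      have hi : i < a.length := by simpa using h1
      rw [← List.getD_eq_getElem a 0 hi]
      by_cases hc : b.length ≤ i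
      · rw [if_pos ((index_cond _ _).2 hc), List.getD_eq_default b 0 hc]
      · rw [if_neg (fun hx => hc ((index_cond _ _).1 hx))]
  · rw [if_neg h]
    apply List.ext_getElem
    · simp [alt_length]; omega
    · intro i h1 h2
      rw [List.getElem_mapIdx, ← List.getD_eq_getElem (add_tuple_alt a b) 0 h2, alt_getD]
      have hi : i < b.length := by simpa using h1
      rw [← List.getD_eq_getElem b 0 hi]
      by_cases hc : a.length ≤ i
      · rw [if_pos ((index_cond _ _).2 hc), List.getD_eq_default a 0 hc]
        ring
      · rw [if_neg (fun hx => hc ((index_cond _ _).1 hx))]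
        ring
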